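-- pv_equiv track=rewrite | github.com/EntityOZ/dq_agent | api/services/ai_column_matcher.py | _build_short_name_index
-- ===== SOURCE A (Python) =====
-- def _build_short_name_index(fields: set[str]) -> dict[str, str]:
--     """Build {FIELD_SHORT: TABLE.FIELD} index. Excludes ambiguous short names."""
--     index: dict[str, list[str]] = {}
--     for field in fields:
--         if "." in field:
--             short = field.split(".")[-1]
--         else:
--             short = field
--         index.setdefault(short, []).append(field)
--     # Only keep unambiguous mappings
--     return {short: targets[0] for short, targets in index.items() if len(targets) == 1}
-- ===== SOURCE B (Python) =====
-- def _build_short_name_index(fields: set[str]) -> dict[str, str]: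
--     """Single pass: keep a result dict and a seen set; a repeated short name
--     is evicted from the result immediately, so no second filtering pass."""
--     result: dict[str, str] = {}
--     seen: set[str] = set()
--     for field in fields:
--         short = field.split(".")[-1] if "." in field else field
--         if short in seen:
--             result.pop(short, None)
--         else:
--             seen.add(short)
--             result[short] = field
--     return result
-- ===== Notes on version B (the rewrite author's own statement) =====
-- stated objective: simpler
-- what changed: Replaces the group-into-lists dict plus second filtering comprehension by a single pass that keeps a result dict and a seen set, evicting a short name from the result the moment it repeats, so no lists and no second pass.
import Mathlib
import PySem

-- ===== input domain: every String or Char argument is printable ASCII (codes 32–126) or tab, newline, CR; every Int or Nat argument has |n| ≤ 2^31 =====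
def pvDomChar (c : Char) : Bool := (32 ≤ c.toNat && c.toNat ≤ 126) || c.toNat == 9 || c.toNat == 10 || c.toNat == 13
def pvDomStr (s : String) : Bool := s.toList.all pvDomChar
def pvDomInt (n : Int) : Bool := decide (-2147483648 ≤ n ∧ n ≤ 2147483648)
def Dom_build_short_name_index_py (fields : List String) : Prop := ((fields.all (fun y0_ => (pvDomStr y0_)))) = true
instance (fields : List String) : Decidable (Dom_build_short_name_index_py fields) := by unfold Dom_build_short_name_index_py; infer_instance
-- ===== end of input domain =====

-- B builds the result dict in one pass with a seen set (eager eviction of repeated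
-- short names) instead of A's dict of lists followed by a filtering comprehension.

-- shared helper: field.split(".")[-1] if "." in field else field (identical expression in both Pythons)
def pvShort (field : String) : String :=
  if PySem.Str.isIn "." field then
    PySem.List.pyGetD ((PySem.Str.split? field ".").getD []) (-1) ""
  else field

-- ===== PORT A =====
def build_short_name_index_py (fields : List String) : List (String × String) :=
  let index : PySem.Dict String (List String) :=
    fields.foldl (fun d field => d.modify (pvShort field) [] (· ++ [field])) PySem.Dict.empty
  index.items.filterMap
    (fun p => if p.2.length = 1 then some (p.1, PySem.List.pyGetD p.2 0 "") else none)

-- ===== PORT B =====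
def build_short_name_index_py_alt (fields : List String) : List (String × String) :=
  (fields.foldl
    (fun (st : PySem.Dict String String × PySem.Set String) field =>
      let short := pvShort field
      if PySem.Set.contains st.2 short then (st.1.erase short, st.2)
      else (st.1.insert short field, PySem.Set.add st.2 short))
    (PySem.Dict.empty, PySem.Set.empty)).1.items

-- ===== PRECONDITION & SPEC =====
def Spec_build_short_name_index_py (fields : List String) (out : List (String × String)) : Prop := out = build_short_name_index_py_alt fields
instance (fields : List String) (out : List (String × String)) : Decidable (Spec_build_short_name_index_py fields out) := by unfold Spec_build_short_name_index_py; infer_instance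

-- ===== CLAIM (what is proved, stated in full; the proofs are below) =====
def Claim_equal_build_short_name_index_py : Prop := ∀ (fields : List String), Dom_build_short_name_index_py fields → Spec_build_short_name_index_py fields (build_short_name_index_py fields)

-- ===== LEMMAS AND PROOFS =====

-- the post-processing comprehension of A, as a function on one dict item
def pvSing (p : String × List String) : Option (String × String) :=
  if p.2.length = 1 then some (p.1, PySem.List.pyGetD p.2 0 "") else none

theorem pvSing_key {p : String × List String} {q : String × String}
    (h : pvSing p = some q) : q.1 = p.1 := by
  unfold pvSing at h
  split at h
  · cases h; rfl
  · cases h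

theorem pvKeys_filterMap_sub {l : List (String × List String)} {q : String × String}
    (h : q ∈ l.filterMap pvSing) : q.1 ∈ l.map (·.1) := by
  rcases List.mem_filterMap.mp h with ⟨p, hp, hs⟩
  exact List.mem_map.mpr ⟨p, hp, (pvSing_key hs).symm⟩

theorem pvFilterMap_overwrite (l : List (String × List String)) (short : String)
    (v' : List String) (hv : v'.length ≠ 1) :
    (l.map (fun p => if (p.1 == short) = true then (short, v') else p)).filterMap pvSing
      = (l.filterMap pvSing).filter (fun q => !(q.1 == short)) := by
  induction l with
  | nil => rfl
  | cons p l ih =>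
    have h1 : pvSing (short, v') = none := by unfold pvSing; simp [hv]
    simp only [List.map_cons]
    by_cases hk : p.1 = short
    · rw [if_pos (beq_iff_eq.mpr hk), List.filterMap_cons_none h1]
      cases hs : pvSing p with
      | none => rw [List.filterMap_cons_none hs]; exact ih
      | some q =>
        rw [List.filterMap_cons_some hs,
            List.filter_cons_of_neg (by rw [pvSing_key hs, hk]; simp)]
        exact ih
    · rw [if_neg (by simp [hk])]
      cases hs : pvSing p with
      | none => rw [List.filterMap_cons_none hs, List.filterMap_cons_none hs]; exact ih
      | some q =>
        rw [List.filterMap_cons_some hs, List.filterMap_cons_some hs,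
            List.filter_cons_of_pos (by rw [pvSing_key hs]; simp [hk])]
        rw [ih]

theorem pvKeys_overwrite (l : List (String × List String)) (short : String) (v' : List String) :
    (l.map (fun p => if (p.1 == short) = true then (short, v') else p)).map (·.1) = l.map (·.1) := by
  induction l with
  | nil => rfl
  | cons p l ih =>
    simp only [List.map_cons]
    by_cases hk : p.1 = short
    · rw [if_pos (beq_iff_eq.mpr hk), ih]; simp [hk]
    · rw [if_neg (by simp [hk]), ih]

-- loop invariant: B's running pair is (A's dict filtered to singletons, A's key set)
theorem pvLoop (fields : List String) :
    ∀ (d : PySem.Dict String (List String)) (r : PySem.Dict String String),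
      d.keys.Nodup →
      (∀ p ∈ d.items, p.2 ≠ []) →
      r.items = d.items.filterMap pvSing →
      ((fields.foldl (fun d field => d.modify (pvShort field) [] (· ++ [field])) d).items.filterMap pvSing)
        = (fields.foldl
            (fun (st : PySem.Dict String String × PySem.Set String) field =>
              let short := pvShort field
              if PySem.Set.contains st.2 short then (st.1.erase short, st.2)
              else (st.1.insert short field, PySem.Set.add st.2 short))
            (r, d.keys)).1.items := by
  induction fields with
  | nil =>
    intro d r _ _ hr
    simp [hr]
  | cons field fields ih =>
    intro d r hnd hne hr
    simp only [List.foldl_cons]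
    set short := pvShort field with hshort
    by_cases hmem : short ∈ d.keys
    · -- repeated short name: A appends to the list, B evicts
      have hc : d.contains short = true := ((PySem.Dict.contains_iff_mem_keys _ _).mpr hmem)
      have hsc : PySem.Set.contains d.keys short = true := (PySem.Set.contains_iff _ _).mpr hmem
      obtain ⟨ts, hget⟩ : ∃ ts, d.get? short = some ts := by
        have h := PySem.Dict.contains_eq_isSome_get? d short
        rw [hc] at h
        cases hget : d.get? short with
        | none => rw [hget] at h; simp at h
        | some ts => exact ⟨ts, rfl⟩
      have hts : ts ≠ [] := hne (short, ts) ((PySem.Dict.mem_items_of_get?_eq_some _ hget))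
      have hgetD : d.getD short [] = ts := PySem.Dict.getD_of_get?_eq_some _ _ hget
      have hmod : d.modify short [] (· ++ [field]) = d.insert short (ts ++ [field]) := by
        simp [PySem.Dict.modify, hgetD]
      have hins := PySem.Dict.items_insert_of_contains (d := d) (v := ts ++ [field]) hc
      have hkeys : (d.insert short (ts ++ [field])).keys = d.keys := by
        simp only [PySem.Dict.keys, hins]
        exact pvKeys_overwrite d.items short (ts ++ [field])
      have hlen : (ts ++ [field]).length ≠ 1 := by
        cases ts with
        | nil => exact absurd rfl hts
        | cons a l => simp
      simp only [hsc, if_true, hmod]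
      rw [← hkeys]
      refine ih _ (r.erase short) ?_ ?_ ?_
      · rw [hkeys]; exact hnd
      · intro p hp
        rw [hins] at hp
        rcases List.mem_map.mp hp with ⟨q, hq, hmap⟩
        by_cases hqk : q.1 = short
        · simp only [hqk, beq_self_eq_true, if_true] at hmap
          rw [← hmap]
          simp
        · simp only [beq_false_of_ne hqk] at hmap
          rw [← hmap]; exact hne q hq
      · show (r.items.filter _) = _
        rw [hr, hins, pvFilterMap_overwrite d.items short (ts ++ [field]) hlen]
    · -- fresh short name: A starts a singleton list, B records it
      have hc : d.contains short = false := by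
        rw [← Bool.not_eq_true, PySem.Dict.contains_iff_mem_keys _ _]; exact hmem
      have hsc : PySem.Set.contains d.keys short = false := by
        rw [← Bool.not_eq_true, PySem.Set.contains_iff _ _]; exact hmem
      have hgetD : d.getD short [] = [] := PySem.Dict.getD_of_not_contains _ _ hc
      have hmod : d.modify short [] (· ++ [field]) = d.insert short [field] := by
        simp [PySem.Dict.modify, hgetD]
      have hins := PySem.Dict.items_insert_of_not_contains (d := d) (v := [field]) hc
      have hkeys : (d.insert short [field]).keys = d.keys ++ [short] := by
        simp [PySem.Dict.keys, hins]
      have hrc : r.contains short = false := by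
        rw [← Bool.not_eq_true, PySem.Dict.contains_iff_mem_keys _ _]
        intro habs
        rcases List.mem_map.mp habs with ⟨q, hq, hq1⟩
        rw [hr] at hq
        exact hmem (by rw [← hq1]; exact pvKeys_filterMap_sub hq)
      have hrins : (r.insert short field).items = r.items ++ [(short, field)] :=
        PySem.Dict.items_insert_of_not_contains _ _ hrc
      simp only [hsc, hmod]
      rw [show PySem.Set.add d.keys short = d.keys ++ [short] from PySem.Set.add_of_not_mem hmem,
          ← hkeys]
      refine ih _ (r.insert short field) ?_ ?_ ?_
      · rw [hkeys]
        rw [List.nodup_append]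
        refine ⟨hnd, List.nodup_singleton _, ?_⟩
        intro a ha b hb hab
        rw [List.mem_singleton] at hb
        exact hmem (by rwa [hab, hb] at ha)
      · intro p hp
        rw [hins] at hp
        rcases List.mem_append.mp hp with h | h
        · exact hne p h
        · simp only [List.mem_singleton] at h
          rw [h]; simp
      · rw [hrins, hr, hins, List.filterMap_append]
        simp [pvSing]

-- ===== VERDICT (by name: the statement is the Claim_ definition above) =====
theorem build_short_name_index_py_spec : Claim_equal_build_short_name_index_py := by
  intro fields _
  unfold Spec_build_short_name_index_py build_short_name_index_py build_short_name_index_py_alt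
  exact pvLoop fields PySem.Dict.empty PySem.Dict.empty List.nodup_nil (by simp [PySem.Dict.empty]) rfl
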